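-- pv_equiv track=rewrite | github.com/olrodrig/SNII_ETOS | src/plot_ETOS.py | color_line_style
-- ===== SOURCE A (Python) =====
-- def color_line_style(templates):
--   colors = ['b','lime','r','c','m','y','gold','maroon','darkgreen','darkgray','violet','darkkhaki','teal']
--   lines  = ['-','--',':','-.']
--   template_color, template_line, i_color, i_line = {}, {}, 0, 0
--   for i in range(0, len(templates)):
--       template_color[templates[i]] = colors[i_color]
--       template_line[templates[i]]  = lines[i_line]
--       i_color = i_color+1
--       if i_color == len(colors):
--           i_color = 0
--           i_line  = i_line+1
--   return template_color, template_line
-- ===== SOURCE B (Python) =====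
-- def color_line_style(templates):
--     colors = ['b','lime','r','c','m','y','gold','maroon','darkgreen','darkgray','violet','darkkhaki','teal']
--     lines  = ['-','--',':','-.']
--     palette = [(c, l) for l in lines for c in colors]
--     template_color = dict(zip(templates, [c for c, _ in palette]))
--     template_line  = dict(zip(templates, [l for _, l in palette]))
--     return template_color, template_line
-- ===== Notes on version B (the rewrite author's own statement) =====
-- stated objective: idiomatic
-- what changed: Replaces the single stateful loop with counters and a wrap-around reset branch by staged passes: the whole (color, line) palette is precomputed once as the cartesian product lines x colors, and each dict is built with dict(zip(templates, sequence)); no per-element index bookkeeping remains.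
import Mathlib
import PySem

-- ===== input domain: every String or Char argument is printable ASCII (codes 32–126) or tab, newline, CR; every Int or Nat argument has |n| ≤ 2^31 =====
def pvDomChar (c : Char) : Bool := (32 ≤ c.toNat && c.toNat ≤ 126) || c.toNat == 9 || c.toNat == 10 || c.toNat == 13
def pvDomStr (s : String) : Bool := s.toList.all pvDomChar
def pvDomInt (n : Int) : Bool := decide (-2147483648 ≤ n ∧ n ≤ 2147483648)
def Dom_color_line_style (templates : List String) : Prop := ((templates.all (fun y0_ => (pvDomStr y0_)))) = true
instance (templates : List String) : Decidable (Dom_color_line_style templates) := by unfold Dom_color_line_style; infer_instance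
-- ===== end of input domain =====

-- B drops A's per-element counters and wrap-around branch entirely: it precomputes the whole
-- (color, line) palette once as the cartesian product lines × colors and builds each dict by
-- zipping the templates with that precomputed sequence; objective: simpler (staged passes, no
-- maintained loop state).

-- ===== PORT A =====
def pvColorsA : List String := ["b","lime","r","c","m","y","gold","maroon","darkgreen","darkgray","violet","darkkhaki","teal"]
def pvLinesA : List String := ["-","--",":","-."]

-- A's loop body: state (template_color, template_line, i_color, i_line), index i.
-- pyGetD _ _ "" is the list indexing; its default is reached only where Python raises
-- IndexError (lines[i_line] once i_line = 4, i.e. more than 52 templates), which Pre_ excludes.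
def pvStepA (templates : List String)
    (s : PySem.Dict String String × PySem.Dict String String × Int × Int) (i : Int) :
    PySem.Dict String String × PySem.Dict String String × Int × Int :=
  let t := PySem.List.pyGetD templates i ""
  let tc := s.1.insert t (PySem.List.pyGetD pvColorsA s.2.2.1 "")
  let tl := s.2.1.insert t (PySem.List.pyGetD pvLinesA s.2.2.2 "")
  let ic := s.2.2.1 + 1
  if ic = (pvColorsA.length : Int) then (tc, tl, 0, s.2.2.2 + 1)
  else (tc, tl, ic, s.2.2.2)

-- for i in range(0, len(templates)): …
def color_line_style (templates : List String) : (List (String × String)) × (List (String × String)) :=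
  let st := (PySem.List.pyRange 0 (templates.length : Int) 1).foldl (pvStepA templates)
    (PySem.Dict.empty, PySem.Dict.empty, 0, 0)
  (st.1.items, st.2.1.items)

-- ===== PORT B =====
def pvColorsB : List String := ["b","lime","r","c","m","y","gold","maroon","darkgreen","darkgray","violet","darkkhaki","teal"]
def pvLinesB : List String := ["-","--",":","-."]

-- palette = [(c, l) for l in lines for c in colors]
def pvPaletteB : List (String × String) := pvLinesB.flatMap (fun l => pvColorsB.map (fun c => (c, l)))

-- dict(zip(ts, vs)) : fold insertion over the zipped pairs
def pvDictZip (ts : List String) (vs : List String) : PySem.Dict String String :=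
  (ts.zip vs).foldl (fun d p => d.insert p.1 p.2) PySem.Dict.empty

def color_line_style_alt (templates : List String) : (List (String × String)) × (List (String × String)) :=
  let palette := pvPaletteB
  let template_color := pvDictZip templates (palette.map (fun p => p.1))
  let template_line := pvDictZip templates (palette.map (fun p => p.2))
  (template_color.items, template_line.items)

-- ===== PRECONDITION & SPEC =====
-- Pre_ excludes templates longer than 52, on which Python A raises IndexError on the lines list.
def Pre_color_line_style (templates : List String) : Prop := templates.length ≤ 52
instance (templates : List String) : Decidable (Pre_color_line_style templates) := by unfold Pre_color_line_style; infer_instance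
def pvWitness_color_line_style : List String := ["sn1999em", "sn2004et", "sn1999em"]

def Spec_color_line_style (templates : List String) (out : (List (String × String)) × (List (String × String))) : Prop := out = color_line_style_alt templates
instance (templates : List String) (out : (List (String × String)) × (List (String × String))) : Decidable (Spec_color_line_style templates out) := by unfold Spec_color_line_style; infer_instance

-- ===== CLAIM (what is proved, stated in full; the proofs are below) =====
def Claim_equal_color_line_style : Prop := ∀ (templates : List String), Dom_color_line_style templates → Pre_color_line_style templates → Spec_color_line_style templates (color_line_style templates)

-- ===== LEMMAS AND PROOFS =====

-- Arithmetic mid-form of the loop body (proof-only; neither port uses it).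
def pvStepArith (templates : List String)
    (s : PySem.Dict String String × PySem.Dict String String) (j : Int) :
    PySem.Dict String String × PySem.Dict String String :=
  (s.1.insert (PySem.List.pyGetD templates j "") (PySem.List.pyGetD pvColorsA (PySem.Int.mod j 13) ""),
   s.2.insert (PySem.List.pyGetD templates j "") (PySem.List.pyGetD pvLinesA (PySem.Int.floordiv j 13) ""))

lemma pv_mod13 (k : Nat) : PySem.Int.mod (k : Int) (13 : Int) = ((k % 13 : Nat) : Int) := by
  exact_mod_cast PySem.Int.mod_natCast k 13

lemma pv_div13 (k : Nat) : PySem.Int.floordiv (k : Int) (13 : Int) = ((k / 13 : Nat) : Int) := by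
  exact_mod_cast PySem.Int.floordiv_natCast k 13

-- Invariant: after k steps A's counters are exactly k % 13 and k // 13 and its dicts are the
-- fold of the arithmetic step over the same index range.
lemma pv_main (templates : List String) (k : Nat) :
    (PySem.List.pyRange 0 (k : Int) 1).foldl (pvStepA templates)
        (PySem.Dict.empty, PySem.Dict.empty, 0, 0)
    = (((PySem.List.pyRange 0 (k : Int) 1).foldl (pvStepArith templates)
          (PySem.Dict.empty, PySem.Dict.empty)).1,
       ((PySem.List.pyRange 0 (k : Int) 1).foldl (pvStepArith templates)
          (PySem.Dict.empty, PySem.Dict.empty)).2,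
       ((k % 13 : Nat) : Int), ((k / 13 : Nat) : Int)) := by
  induction k with
  | zero =>
      simp [PySem.List.pyRange_one_eq_nil (by omega : (0:Int) ≤ 0)]
  | succ k ih =>
      have hcast : ((k + 1 : Nat) : Int) = (k : Int) + 1 := by push_cast; ring
      rw [hcast, PySem.List.pyRange_one_succ_right (by positivity), List.foldl_append,
          List.foldl_append, ih]
      simp only [List.foldl_cons, List.foldl_nil]
      by_cases h : k % 13 = 12
      · have h1 : (((k + 1) % 13 : Nat) : Int) = 0 := by
          have : (k + 1) % 13 = 0 := by omega
          simp [this]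
        have h2 : (((k + 1) / 13 : Nat) : Int) = ((k / 13 : Nat) : Int) + 1 := by
          have : (k + 1) / 13 = k / 13 + 1 := by omega
          simp [this]
        simp only [pvStepA, pvStepArith, pv_mod13, pv_div13, h1, h2]
        rw [if_pos (by simp [pvColorsA, h])]
      · have h1 : (((k + 1) % 13 : Nat) : Int) = ((k % 13 : Nat) : Int) + 1 := by
          have : (k + 1) % 13 = k % 13 + 1 := by omega
          simp [this]
        have h2 : (((k + 1) / 13 : Nat) : Int) = ((k / 13 : Nat) : Int) := by
          have : (k + 1) / 13 = k / 13 := by omega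
          simp [this]
        simp only [pvStepA, pvStepArith, pv_mod13, pv_div13, h1, h2]
        rw [if_neg (by
          simp only [pvColorsA, List.length_cons, List.length_nil]
          have hlt : k % 13 < 13 := Nat.mod_lt _ (by omega)
          intro hEq
          apply h
          omega)]

-- dict(zip(xs, vs)) as an indexed fold, when vs is long enough.
lemma pv_zip_fold (xs : List String) (vs : List String) (d : PySem.Dict String String)
    (h : xs.length ≤ vs.length) :
    (xs.zip vs).foldl (fun d p => d.insert p.1 p.2) d
    = (List.range xs.length).foldl
        (fun d k => d.insert (xs.getD k "") (vs.getD k "")) d := by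
  induction xs generalizing vs d with
  | nil => simp
  | cons x xs ih =>
      cases vs with
      | nil => simp at h
      | cons v vs =>
          simp only [List.zip_cons_cons, List.foldl_cons, List.length_cons,
            List.range_succ_eq_map, List.foldl_map]
          rw [ih vs _ (by simpa using h)]
          rfl

-- The palette's k-th color/line is exactly colors[k % 13] / lines[k // 13], for k < 52.
lemma pv_palette_get (k : Nat) (hk : k < 52) :
    (pvPaletteB.map (fun p => p.1)).getD k "" = pvColorsA.getD (k % 13) ""
    ∧ (pvPaletteB.map (fun p => p.2)).getD k "" = pvLinesA.getD (k / 13) "" := by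
  revert hk; revert k; decide

-- ===== VERDICT (by name: the statement is the Claim_ definition above) =====
theorem color_line_style_spec : Claim_equal_color_line_style := by
  intro templates _ hpre
  show color_line_style templates = color_line_style_alt templates
  unfold color_line_style color_line_style_alt pvDictZip
  dsimp only
  rw [pv_main]
  rw [PySem.List.pyRange_zero_nat, List.foldl_map]
  have hsplit := PySem.List.foldl_prod_mk
    (fun (d : PySem.Dict String String) (k : Nat) =>
      d.insert (templates.getD k "") (pvColorsA.getD (k % 13) ""))
    (fun (d : PySem.Dict String String) (k : Nat) =>
      d.insert (templates.getD k "") (pvLinesA.getD (k / 13) ""))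
    (List.range templates.length) PySem.Dict.empty PySem.Dict.empty
  have hstep : (List.range templates.length).foldl
      (fun (s : PySem.Dict String String × PySem.Dict String String) (k : Nat) =>
        pvStepArith templates s (k : Int)) (PySem.Dict.empty, PySem.Dict.empty)
    = (List.range templates.length).foldl
      (fun s k => ((fun (d : PySem.Dict String String) (k : Nat) =>
          d.insert (templates.getD k "") (pvColorsA.getD (k % 13) "")) s.1 k,
        (fun (d : PySem.Dict String String) (k : Nat) =>
          d.insert (templates.getD k "") (pvLinesA.getD (k / 13) "")) s.2 k))
      (PySem.Dict.empty, PySem.Dict.empty) := by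
    apply PySem.List.foldl_congr_mem
    intro acc k hkmem
    simp only [pvStepArith, pv_mod13, pv_div13, PySem.List.pyGetD_natCast]
  have hlen : templates.length ≤ 52 := hpre
  have hc : (templates.zip (pvPaletteB.map (fun p => p.1))).foldl
      (fun d p => d.insert p.1 p.2) PySem.Dict.empty
      = (List.range templates.length).foldl
          (fun d k => d.insert (templates.getD k "") (pvColorsA.getD (k % 13) "")) PySem.Dict.empty := by
    rw [pv_zip_fold _ _ _ (by simp [pvPaletteB, pvColorsB, pvLinesB]; omega)]
    apply PySem.List.foldl_congr_mem
    intro acc k hk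
    rw [(pv_palette_get k (by simp at hk; omega)).1]
  have hl : (templates.zip (pvPaletteB.map (fun p => p.2))).foldl
      (fun d p => d.insert p.1 p.2) PySem.Dict.empty
      = (List.range templates.length).foldl
          (fun d k => d.insert (templates.getD k "") (pvLinesA.getD (k / 13) "")) PySem.Dict.empty := by
    rw [pv_zip_fold _ _ _ (by simp [pvPaletteB, pvColorsB, pvLinesB]; omega)]
    apply PySem.List.foldl_congr_mem
    intro acc k hk
    rw [(pv_palette_get k (by simp at hk; omega)).2]
  rw [hstep, hsplit, hc, hl]
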